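-- pv_equiv track=rewrite | github.com/stpr-dev/aoc-python-2025 | src/aoc2025/day03.py | get_largest_sub_list
-- ===== SOURCE A (Python) =====
-- from typing import Protocol, TypeVar
--
-- T = TypeVar("T", bound="Comparable")
--
-- def get_largest_sub_list(lst: list[T]) -> list[T]:
--     """Return the largest sublist in the input list formed by removing exactly one
--     element."""
--
--     if len(lst) < 2:
--         raise ValueError(
--             f"Got {len(lst)=} elements in the input list, expected at least 2."
--         )
--
--     for idx in range(len(lst) - 1):
--         if lst[idx] < lst[idx + 1]:
--             return lst[:idx] + lst[idx + 1 :]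
--
--     return lst[:-1]
-- ===== SOURCE B (Python) =====
-- def get_largest_sub_list(lst):
--     """Return the largest sublist in the input list formed by removing exactly one
--     element."""
--
--     if len(lst) < 2:
--         raise ValueError(
--             f"Got {len(lst)=} elements in the input list, expected at least 2."
--         )
--
--     return max(lst[:i] + lst[i + 1:] for i in range(len(lst)))
-- ===== Notes on version B (the rewrite author's own statement) =====
-- stated objective: simpler
-- what changed: Replaces the greedy first-ascent early-return scan by enumerating all n one-removal candidate lists and returning their lexicographic maximum via max().
import Mathlib
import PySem

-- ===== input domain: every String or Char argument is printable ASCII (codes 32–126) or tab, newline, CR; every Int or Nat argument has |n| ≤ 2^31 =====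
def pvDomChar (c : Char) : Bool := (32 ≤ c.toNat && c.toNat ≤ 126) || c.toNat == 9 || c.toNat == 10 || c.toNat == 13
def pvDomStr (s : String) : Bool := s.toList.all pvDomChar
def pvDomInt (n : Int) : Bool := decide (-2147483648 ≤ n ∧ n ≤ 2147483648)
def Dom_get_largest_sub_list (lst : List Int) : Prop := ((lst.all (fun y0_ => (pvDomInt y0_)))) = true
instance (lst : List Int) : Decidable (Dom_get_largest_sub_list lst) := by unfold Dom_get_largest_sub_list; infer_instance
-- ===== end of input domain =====

-- B replaces A's greedy first-ascent early-return scan by enumerating all one-removal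
-- candidate lists and taking their lexicographic max (objective: simpler).

-- ===== PORT A =====
-- the 'for idx in range(len(lst) - 1)' loop with its early return; indices produced by
-- pyRange are always in range, so pyGetD with default 0 is exact here
def aGo (lst : List Int) : List Int → List Int
  | [] => PySem.List.slice lst none (some (-1))      -- return lst[:-1]
  | idx :: rest =>
      if PySem.List.pyGetD lst idx 0 < PySem.List.pyGetD lst (idx + 1) 0 then
        PySem.List.slice lst none (some idx) ++ PySem.List.slice lst (some (idx + 1)) none
      else aGo lst rest

def get_largest_sub_list (lst : List Int) : List Int :=
  if lst.length < 2 then []                          -- Python raises ValueError here; excluded by Pre_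
  else aGo lst (PySem.List.pyRange 0 ((lst.length : Int) - 1) 1)

-- ===== PORT B =====
def get_largest_sub_list_alt (lst : List Int) : List Int :=
  if lst.length < 2 then []                          -- Python raises ValueError here; excluded by Pre_
  else
    let candidates := (PySem.List.pyRange 0 (lst.length : Int) 1).map
      (fun i => PySem.List.slice lst none (some i) ++ PySem.List.slice lst (some (i + 1)) none)
    (PySem.List.max? candidates (fun c => c)).getD []   -- max(candidates); nonempty since len ≥ 2

-- ===== PRECONDITION & SPEC =====
-- Pre_ excludes exactly the inputs (fewer than 2 elements) on which the Python A raises ValueError.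
def Pre_get_largest_sub_list (lst : List Int) : Prop := 2 ≤ lst.length
instance (lst : List Int) : Decidable (Pre_get_largest_sub_list lst) := by unfold Pre_get_largest_sub_list; infer_instance
def pvWitness_get_largest_sub_list : List Int := [1, 2]
def Spec_get_largest_sub_list (lst : List Int) (out : List Int) : Prop := out = get_largest_sub_list_alt lst
instance (lst : List Int) (out : List Int) : Decidable (Spec_get_largest_sub_list lst out) := by unfold Spec_get_largest_sub_list; infer_instance

-- ===== CLAIM (what is proved, stated in full; the proofs are below) =====
def Claim_equal_get_largest_sub_list : Prop := ∀ (lst : List Int), Dom_get_largest_sub_list lst → Pre_get_largest_sub_list lst → Spec_get_largest_sub_list lst (get_largest_sub_list lst)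

-- ===== LEMMAS AND PROOFS =====

-- structural form of A's greedy rule: drop the first element sitting before an ascent, else the last
def gGreedy : List Int → List Int
  | [] => []
  | [_] => []
  | x :: y :: t => if x < y then y :: t else x :: gGreedy (y :: t)

-- structural form of B's candidate list: all lists obtained by removing one element, in order
def candList : List Int → List (List Int)
  | [] => []
  | x :: t => t :: (candList t).map (x :: ·)

theorem gGreedy_mem_candList : ∀ l : List Int, l ≠ [] → gGreedy l ∈ candList l := by
  intro l
  induction l with
  | nil => intro h; exact absurd rfl h
  | cons x t ih =>
    intro _
    cases t with
    | nil => simp [gGreedy, candList]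
    | cons y t' =>
      by_cases hxy : x < y
      · simp [gGreedy, candList, hxy]
      · simp only [gGreedy, if_neg hxy, candList, List.mem_cons]
        right
        exact List.mem_map_of_mem (ih (by simp))

theorem candList_le_gGreedy : ∀ (l : List Int) (c : List Int), c ∈ candList l → c ≤ gGreedy l := by
  intro l
  induction l with
  | nil => intro c hc; simp [candList] at hc
  | cons x t ih =>
    intro c hc
    cases t with
    | nil =>
      simp [candList] at hc
      simp [hc, gGreedy]
    | cons y t' =>
      rw [show candList (x :: y :: t') = (y :: t') :: (candList (y :: t')).map (x :: ·) from rfl] at hc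
      simp only [List.mem_cons, List.mem_map] at hc
      by_cases hxy : x < y
      · -- gGreedy = y :: t'
        simp only [gGreedy, if_pos hxy]
        rcases hc with rfl | ⟨d, _, rfl⟩
        · exact le_refl _
        · exact le_of_lt (List.cons_lt_cons_iff.mpr (Or.inl hxy))
      · -- gGreedy = x :: gGreedy (y :: t')
        simp only [gGreedy, if_neg hxy]
        rcases hc with rfl | ⟨d, hd, rfl⟩
        · -- c = y :: t' ≤ x :: gGreedy (y :: t'); use y ≤ x and y :: t' is the 0th candidate of y :: t'
          have hyx : y ≤ x := le_of_not_gt hxy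
          rcases lt_or_eq_of_le hyx with hlt | heq
          · exact le_of_lt (List.cons_lt_cons_iff.mpr (Or.inl hlt))
          · have ht : (t' : List Int) ≤ gGreedy (y :: t') := by
              have : t' ∈ candList (y :: t') := by simp [candList]
              exact ih _ this
            subst heq
            exact List.cons_le_cons y ht
        · exact List.cons_le_cons x (ih _ hd)

-- shift lemmas about pyRange / slices used to bridge the index-and-slice ports to the structural forms
theorem pyRange_one_shift (b : Int) :
    PySem.List.pyRange 1 b 1 = (PySem.List.pyRange 0 (b - 1) 1).map (· + 1) := by
  rw [PySem.List.pyRange_one, PySem.List.pyRange_one, List.map_map]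
  have : (b - 0 - 1).toNat = (b - 1).toNat := by omega
  rw [show b - 1 - 0 = b - 0 - 1 by omega, this]
  apply List.map_congr_left
  intro k _
  simp only [Function.comp_apply]
  omega

theorem cand_shift (x : Int) (l : List Int) (j : Int) (hj : 0 ≤ j) :
    PySem.List.slice (x :: l) none (some (j + 1)) ++ PySem.List.slice (x :: l) (some (j + 1 + 1)) none
      = x :: (PySem.List.slice l none (some j) ++ PySem.List.slice l (some (j + 1)) none) := by
  obtain ⟨n, rfl⟩ := Int.eq_ofNat_of_zero_le hj
  rw [show ((n : Int) + 1) = ((n + 1 : Nat) : Int) by omega,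
      show ((n + 1 : Nat) : Int) + 1 = ((n + 2 : Nat) : Int) by omega]
  rw [PySem.List.slice_to_natCast, PySem.List.slice_to_natCast,
      PySem.List.slice_from_natCast, PySem.List.slice_from_natCast]
  simp [List.take_succ_cons, List.drop_succ_cons]

theorem pyGetD_cons_shift (x : Int) (l : List Int) (j : Int) (hj : 0 ≤ j) :
    PySem.List.pyGetD (x :: l) (j + 1) 0 = PySem.List.pyGetD l j 0 := by
  obtain ⟨n, rfl⟩ := Int.eq_ofNat_of_zero_le hj
  rw [show ((n : Int) + 1) = ((n + 1 : Nat) : Int) by omega,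
      PySem.List.pyGetD_natCast, PySem.List.pyGetD_natCast]
  simp

theorem aGo_shift (x : Int) (l : List Int) (hl : l ≠ []) :
    ∀ js : List Int, (∀ j ∈ js, 0 ≤ j) →
      aGo (x :: l) (js.map (· + 1)) = x :: aGo l js := by
  intro js
  induction js with
  | nil =>
    intro _
    simp only [List.map_nil, aGo, PySem.List.slice_to_neg_one]
    cases l with
    | nil => exact absurd rfl hl
    | cons y t => simp [List.dropLast_cons_of_ne_nil]
  | cons j js ihj =>
    intro hjs
    have hj : 0 ≤ j := hjs j (by simp)
    simp only [List.map_cons, aGo]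
    rw [pyGetD_cons_shift x l j hj, pyGetD_cons_shift x l (j + 1) (by omega)]
    split_ifs with h
    · exact cand_shift x l j hj
    · exact ihj (fun i hi => hjs i (by simp [hi]))

theorem aGo_eq_gGreedy : ∀ l : List Int, 1 ≤ l.length →
    aGo l (PySem.List.pyRange 0 ((l.length : Int) - 1) 1) = gGreedy l := by
  intro l
  induction l with
  | nil => intro h; simp at h
  | cons x t ih =>
    intro _
    cases t with
    | nil =>
      rw [show ((([x] : List Int).length : Int) - 1) = 0 by simp,
          PySem.List.pyRange_one_eq_nil (by omega)]
      simp [aGo, PySem.List.slice_to_neg_one, gGreedy]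
    | cons y t' =>
      have hlen : (0 : Int) < ((x :: y :: t').length : Int) - 1 := by
        simp only [List.length_cons]; push_cast; omega
      rw [PySem.List.pyRange_one_cons (by omega)]
      simp only [aGo]
      have h0 : PySem.List.pyGetD (x :: y :: t') 0 0 = x := by
        rw [show (0 : Int) = ((0 : Nat) : Int) by simp, PySem.List.pyGetD_natCast]; simp
      have h1 : PySem.List.pyGetD (x :: y :: t') (0 + 1) 0 = y := by
        rw [show ((0 : Int) + 1) = ((1 : Nat) : Int) by simp, PySem.List.pyGetD_natCast]; simp
      rw [h0, h1]
      split_ifs with hxy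
      · -- returns lst[:0] ++ lst[1:]
        rw [show (0 : Int) + 1 = ((1 : Nat) : Int) by simp]
        rw [PySem.List.slice_from_natCast]
        simp [PySem.List.slice, gGreedy, hxy]
      · -- loop continues over range(1, len-1); shift to the tail
        have hshift : PySem.List.pyRange 1 (((x :: y :: t').length : Int) - 1) 1
            = (PySem.List.pyRange 0 (((y :: t').length : Int) - 1) 1).map (· + 1) := by
          rw [pyRange_one_shift,
              show (((x :: y :: t').length : Int) - 1) - 1 = ((y :: t').length : Int) - 1 by
                simp only [List.length_cons]; push_cast; omega]
        rw [show (0 : Int) + 1 = 1 by omega, hshift,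
            aGo_shift x (y :: t') (by simp) _
              (fun j hj => ((PySem.List.mem_pyRange_one).mp hj).1),
            ih (by simp)]
        simp [gGreedy, hxy]

theorem candSlices_eq_candList : ∀ l : List Int,
    (PySem.List.pyRange 0 (l.length : Int) 1).map
      (fun i => PySem.List.slice l none (some i) ++ PySem.List.slice l (some (i + 1)) none)
      = candList l := by
  intro l
  induction l with
  | nil => simp [PySem.List.pyRange_one_eq_nil, candList]
  | cons x t ih =>
    rw [show (((x :: t).length : Int)) = (t.length : Int) + 1 by simp,
        PySem.List.pyRange_one_cons (by omega)]
    simp only [List.map_cons, zero_add]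
    have h0 : PySem.List.slice (x :: t) none (some 0) ++ PySem.List.slice (x :: t) (some 1) none = t := by
      rw [show ((1 : Int)) = ((1 : Nat) : Int) by simp, PySem.List.slice_from_natCast]
      simp [PySem.List.slice]
    have hshift : PySem.List.pyRange 1 ((t.length : Int) + 1) 1
        = (PySem.List.pyRange 0 (t.length : Int) 1).map (· + 1) := by
      rw [pyRange_one_shift, show ((t.length : Int) + 1 - 1) = (t.length : Int) by omega]
    rw [h0, hshift, List.map_map, candList]
    congr 1
    rw [← ih, List.map_map]
    apply List.map_congr_left
    intro j hj
    have hj0 : 0 ≤ j := ((PySem.List.mem_pyRange_one).mp hj).1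
    exact cand_shift x t j hj0

theorem max_candList_eq_gGreedy (l : List Int) (hl : l ≠ []) :
    (PySem.List.max? (candList l) (fun c => c)).getD [] = gGreedy l := by
  obtain ⟨x, t, rfl⟩ := List.exists_cons_of_ne_nil hl
  rw [show candList (x :: t) = t :: (candList t).map (x :: ·) from rfl]
  set cs := (candList t).map (x :: ·) with hcs
  have hmax : PySem.List.max? (t :: cs) (fun c => c) = some (List.foldl max t cs) := by
    convert PySem.List.max?_id_cons t cs using 2
  rw [hmax]
  simp only [Option.getD_some]
  have hmem : List.foldl max t cs ∈ candList (x :: t) := by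
    rcases PySem.List.foldl_max_mem cs t with h | h
    · rw [h, candList]; simp
    · rw [candList]; exact List.mem_cons_of_mem _ h
  have hle : List.foldl max t cs ≤ gGreedy (x :: t) :=
    candList_le_gGreedy _ _ hmem
  have hge : gGreedy (x :: t) ≤ List.foldl max t cs := by
    have hg := gGreedy_mem_candList (x :: t) (by simp)
    rw [candList] at hg
    rcases List.mem_cons.mp hg with h | h
    · rw [h]; exact (PySem.List.le_foldl_max cs t).1
    · exact (PySem.List.le_foldl_max cs t).2 _ h
  exact le_antisymm hle hge

-- ===== VERDICT (by name: the statement is the Claim_ definition above) =====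
theorem get_largest_sub_list_spec : Claim_equal_get_largest_sub_list := by
  intro lst _ hpre
  unfold Spec_get_largest_sub_list get_largest_sub_list get_largest_sub_list_alt
  have h2 : ¬ lst.length < 2 := by
    unfold Pre_get_largest_sub_list at hpre; omega
  rw [if_neg h2, if_neg h2]
  have hne : lst ≠ [] := by
    intro h; subst h; exact h2 (by simp)
  rw [aGo_eq_gGreedy lst (by omega), candSlices_eq_candList lst,
      max_candList_eq_gGreedy lst hne]
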